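-- pv_equiv track=rewrite | github.com/aminbita162-glitch/restaurant-ai-platform | backend/restaurant_ai_platform/orchestrator.py | _select_plan
-- ===== SOURCE A (Python) =====
-- from typing import Any, Callable, Dict, List, Optional, Tuple
--
-- PIPELINE_ORDER: List[str] = [
--     "real_data_ingestion",
--     "1_data_ingestion",
--     "2_data_warehouse",
--     "3_feature_engineering",
--     "4_feature_store_sync",
--     "model_registry",
--     "5_ml_prediction",
--     "6_optimization",
--     "gpt_insight",
--     "7_api_serving",
--     "8_dashboard_update",
--     "9_model_training",
-- ]
--
-- def _select_plan(requested_steps: Optional[List[str]]) -> Tuple[List[str], List[str]]: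
--     if requested_steps is None:
--         return list(PIPELINE_ORDER), []
--
--     valid = set(PIPELINE_ORDER)
--     plan: List[str] = []
--     unknown: List[str] = []
--
--     for s in requested_steps:
--         if s in valid:
--             plan.append(s)
--         else:
--             unknown.append(s)
--
--     # dedupe keep order
--     seen: set[str] = set()
--     unique_plan: List[str] = []
--     for s in plan:
--         if s not in seen:
--             unique_plan.append(s)
--             seen.add(s)
--
--     seen2: set[str] = set()
--     unique_unknown: List[str] = []
--     for s in unknown:
--         if s not in seen2:
--             unique_unknown.append(s)
--             seen2.add(s)
--
--     return unique_plan, unique_unknown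
-- ===== SOURCE B (Python) =====
-- from typing import List, Optional, Tuple
--
-- PIPELINE_ORDER: List[str] = [
--     "real_data_ingestion",
--     "1_data_ingestion",
--     "2_data_warehouse",
--     "3_feature_engineering",
--     "4_feature_store_sync",
--     "model_registry",
--     "5_ml_prediction",
--     "6_optimization",
--     "gpt_insight",
--     "7_api_serving",
--     "8_dashboard_update",
--     "9_model_training",
-- ]
--
-- def _select_plan(requested_steps: Optional[List[str]]) -> Tuple[List[str], List[str]]:
--     if requested_steps is None:
--         return list(PIPELINE_ORDER), []
--
--     valid = set(PIPELINE_ORDER)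
--     seen: set[str] = set()
--     plan: List[str] = []
--     unknown: List[str] = []
--     for s in requested_steps:
--         if s in seen:
--             continue
--         seen.add(s)
--         (plan if s in valid else unknown).append(s)
--     return plan, unknown
-- ===== Notes on version B (the rewrite author's own statement) =====
-- stated objective: simpler
-- what changed: Fuses A's three loops (partition pass plus two separate dedup passes) into one traversal that maintains a single seen-set and appends each first occurrence directly to plan or unknown; correct because valid and unknown values are disjoint, so one shared seen-set cannot cross-suppress.
import Mathlib
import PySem

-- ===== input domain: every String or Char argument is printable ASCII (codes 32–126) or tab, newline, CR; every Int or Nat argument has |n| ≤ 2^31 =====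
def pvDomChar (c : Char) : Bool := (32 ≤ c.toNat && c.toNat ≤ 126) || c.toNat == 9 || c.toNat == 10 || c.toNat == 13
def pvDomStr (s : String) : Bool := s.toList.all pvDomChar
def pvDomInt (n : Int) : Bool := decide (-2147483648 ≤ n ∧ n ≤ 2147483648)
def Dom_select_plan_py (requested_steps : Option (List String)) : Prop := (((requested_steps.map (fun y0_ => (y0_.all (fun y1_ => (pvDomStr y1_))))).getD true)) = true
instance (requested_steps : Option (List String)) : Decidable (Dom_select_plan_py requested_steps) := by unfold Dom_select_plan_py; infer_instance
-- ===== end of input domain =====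

-- B fuses A's three loops (partition + two dedup passes) into one traversal with a single
-- seen-set; objective: simpler (same O(n) cost, one pass instead of three).

def pvPipelineOrder : List String :=
  ["real_data_ingestion", "1_data_ingestion", "2_data_warehouse", "3_feature_engineering",
   "4_feature_store_sync", "model_registry", "5_ml_prediction", "6_optimization",
   "gpt_insight", "7_api_serving", "8_dashboard_update", "9_model_training"]

-- ===== PORT A =====
-- the partition loop body: 'if s in valid: plan.append(s) else: unknown.append(s)'
def pvPartStep (valid : PySem.Set String) (pu : List String × List String) (s : String) :
    List String × List String :=
  if valid.contains s then (pu.1 ++ [s], pu.2) else (pu.1, pu.2 ++ [s])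

-- the dedupe-keep-order loop body over state (seen, out)
def pvDedupStep (st : PySem.Set String × List String) (s : String) :
    PySem.Set String × List String :=
  if st.1.contains s then st else (PySem.Set.add st.1 s, st.2 ++ [s])

def select_plan_py (requested_steps : Option (List String)) : List String × List String :=
  match requested_steps with
  | none => (pvPipelineOrder, [])
  | some steps =>
    let valid : PySem.Set String := PySem.Set.ofList pvPipelineOrder
    let pu := steps.foldl (pvPartStep valid) ([], [])
    let uniquePlan := (pu.1.foldl pvDedupStep (PySem.Set.empty, [])).2
    let uniqueUnknown := (pu.2.foldl pvDedupStep (PySem.Set.empty, [])).2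
    (uniquePlan, uniqueUnknown)

-- ===== PORT B =====
-- B's single loop body over state (seen, plan, unknown)
def pvFuseStep (valid : PySem.Set String)
    (st : PySem.Set String × List String × List String) (s : String) :
    PySem.Set String × List String × List String :=
  if st.1.contains s then st
  else (PySem.Set.add st.1 s,
        if valid.contains s then (st.2.1 ++ [s], st.2.2) else (st.2.1, st.2.2 ++ [s]))

def select_plan_py_alt (requested_steps : Option (List String)) : List String × List String :=
  match requested_steps with
  | none => (pvPipelineOrder, [])
  | some steps =>
    let valid : PySem.Set String := PySem.Set.ofList pvPipelineOrder
    let r := steps.foldl (pvFuseStep valid) (PySem.Set.empty, [], [])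
    (r.2.1, r.2.2)

-- ===== PRECONDITION & SPEC =====
def Spec_select_plan_py (requested_steps : Option (List String)) (out : List String × List String) : Prop := out = select_plan_py_alt requested_steps
instance (requested_steps : Option (List String)) (out : List String × List String) : Decidable (Spec_select_plan_py requested_steps out) := by unfold Spec_select_plan_py; infer_instance

-- ===== CLAIM (what is proved, stated in full; the proofs are below) =====
def Claim_equal_select_plan_py : Prop := ∀ (requested_steps : Option (List String)), Dom_select_plan_py requested_steps → Spec_select_plan_py requested_steps (select_plan_py requested_steps)

-- ===== LEMMAS AND PROOFS =====

-- the partition fold is append of the two filters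
lemma pv_part_eq (valid : PySem.Set String) :
    ∀ (steps : List String) (p u : List String),
      steps.foldl (pvPartStep valid) (p, u) =
        (p ++ steps.filter (fun s => decide (s ∈ valid)),
         u ++ steps.filter (fun s => !decide (s ∈ valid))) := by
  intro steps
  induction steps with
  | nil => intro p u; simp
  | cons s rest ih =>
    intro p u
    by_cases hv : s ∈ valid <;>
      simp [pvPartStep, hv, ih]

-- the fused fold equals the two dedup folds over the filtered lists, as long as the three
-- seen-sets agree on valid (resp. invalid) elements
lemma pv_fuse_eq (valid : PySem.Set String) :
    ∀ (steps : List String) (seen sv su : PySem.Set String) (p u : List String),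
      (∀ x ∈ valid, (x ∈ seen ↔ x ∈ sv)) →
      (∀ x, x ∉ valid → (x ∈ seen ↔ x ∈ su)) →
      (steps.foldl (pvFuseStep valid) (seen, p, u)).2 =
        (((steps.filter (fun s => decide (s ∈ valid))).foldl pvDedupStep (sv, p)).2,
         ((steps.filter (fun s => !decide (s ∈ valid))).foldl pvDedupStep (su, u)).2) := by
  intro steps
  induction steps with
  | nil => intro seen sv su p u _ _; rfl
  | cons s rest ih =>
    intro seen sv su p u h1 h2
    by_cases hv : s ∈ valid
    · by_cases hs : s ∈ seen
      · have hsv : s ∈ sv := (h1 s hv).mp hs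
        simp only [List.foldl_cons, List.filter_cons, hv, hs, hsv, pvFuseStep, pvDedupStep,
          PySem.Set.contains_eq_listContains, List.contains_eq_mem, decide_true,
          Bool.not_true, Bool.false_eq_true, if_false, if_true]
        exact ih seen sv su p u h1 h2
      · have hsv : s ∉ sv := fun h => hs ((h1 s hv).mpr h)
        simp only [List.foldl_cons, List.filter_cons, hv, hs, hsv, pvFuseStep, pvDedupStep,
          PySem.Set.contains_eq_listContains, List.contains_eq_mem, decide_true, decide_false,
          Bool.not_true, Bool.false_eq_true, if_false, if_true]
        apply ih
        · intro x hx
          simp [PySem.Set.mem_add, h1 x hx]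
        · intro x hx
          have hne : x ≠ s := fun he => hx (he ▸ hv)
          simp [PySem.Set.mem_add, hne, h2 x hx]
    · by_cases hs : s ∈ seen
      · have hsu : s ∈ su := (h2 s hv).mp hs
        simp only [List.foldl_cons, List.filter_cons, hv, hs, hsu, pvFuseStep, pvDedupStep,
          PySem.Set.contains_eq_listContains, List.contains_eq_mem, decide_true, decide_false,
          Bool.not_false, Bool.false_eq_true, if_false, if_true]
        exact ih seen sv su p u h1 h2
      · have hsu : s ∉ su := fun h => hs ((h2 s hv).mpr h)
        simp only [List.foldl_cons, List.filter_cons, hv, hs, hsu, pvFuseStep, pvDedupStep,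
          PySem.Set.contains_eq_listContains, List.contains_eq_mem, decide_true, decide_false,
          Bool.not_false, Bool.false_eq_true, if_false, if_true]
        apply ih
        · intro x hx
          have hne : x ≠ s := fun he => hv (he ▸ hx)
          simp [PySem.Set.mem_add, hne, h1 x hx]
        · intro x hx
          simp [PySem.Set.mem_add, h2 x hx]

-- ===== VERDICT (by name: the statement is the Claim_ definition above) =====
theorem select_plan_py_spec : Claim_equal_select_plan_py := by
  intro requested_steps _
  unfold Spec_select_plan_py select_plan_py select_plan_py_alt
  cases requested_steps with
  | none => rfl
  | some steps =>
    simp only []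
    rw [pv_fuse_eq _ steps PySem.Set.empty PySem.Set.empty PySem.Set.empty [] []
      (fun _ _ => Iff.rfl) (fun _ _ => Iff.rfl), pv_part_eq]
    simp
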